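-- pv_equiv track=rewrite | github.com/Riiti/Advent-of-Code-2021 | aoc/challenges/year_2022/day_1/__init__.py | sum_chunks
-- ===== SOURCE A (Python) =====
-- def sum_chunks(data: list[str]) -> list[int]:
--     """Calc the sum over numbers till the first empty string is found"""
--     sums = []
--     sum = 0
--     for calories in data:
--         try:
--             sum += int(calories)
--         except ValueError:
--             sums.append(sum)
--             sum = 0
--     return sums
-- ===== SOURCE B (Python) =====
-- def sum_chunks(data: list[str]) -> list[int]:
--     """Boundary-tracking pass: record chunk boundaries and sum each slice directly."""
--     def isint(s):
--         try:
--             int(s)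
--             return True
--         except ValueError:
--             return False
--
--     sums = []
--     start = 0
--     for i, tok in enumerate(data):
--         if not isint(tok):
--             sums.append(sum(int(x) for x in data[start:i]))
--             start = i + 1
--     return sums
-- ===== Notes on version B (the rewrite author's own statement) =====
-- stated objective: alternative
-- what changed: Replaces the running accumulator (add each parsed token as it passes, reset on separator) with a boundary-tracking pass that keeps only a start index and, at each separator, sums the slice data[start:i] directly; state and traversal of intermediate values differ, the trailing chunk is still dropped.
import Mathlib
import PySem

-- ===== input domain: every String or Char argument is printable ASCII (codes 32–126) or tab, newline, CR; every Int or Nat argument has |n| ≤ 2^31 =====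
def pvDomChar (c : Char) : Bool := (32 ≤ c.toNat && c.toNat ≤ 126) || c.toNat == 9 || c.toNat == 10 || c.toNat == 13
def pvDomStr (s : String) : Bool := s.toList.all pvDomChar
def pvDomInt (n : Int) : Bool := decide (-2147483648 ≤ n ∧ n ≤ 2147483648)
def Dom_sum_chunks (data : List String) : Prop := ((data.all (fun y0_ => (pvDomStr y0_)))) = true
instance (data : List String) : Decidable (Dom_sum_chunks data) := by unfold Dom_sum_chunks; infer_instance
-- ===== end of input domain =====

-- B replaces A's running accumulator with a boundary-tracking pass that sums each
-- slice data[start:i] directly at a separator (objective: alternative decomposition).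

-- ===== PORT A =====
-- A's for-loop: state (sums, sum); int(calories) succeeds → add, ValueError → append and reset.
def sumChunksLoopA : List String → List Int → Int → List Int
  | [], sums, _ => sums
  | c :: rest, sums, s =>
    match PySem.Int.ofStr? c with
    | some n => sumChunksLoopA rest sums (s + n)
    | none => sumChunksLoopA rest (sums ++ [s]) 0

def sum_chunks (data : List String) : List Int := sumChunksLoopA data [] 0

-- ===== PORT B =====
-- isint(s): try int(s) / except ValueError
def pvIsint (s : String) : Bool := (PySem.Int.ofStr? s).isSome

-- sum(int(x) for x in chunk); every x in the slices B takes parses, so int(x)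
-- never raises there and getD 0 is exact on the reachable inputs.
def pvChunkSum (xs : List String) : Int := (xs.map (fun x => (PySem.Int.ofStr? x).getD 0)).sum

-- B's for-loop over enumerate(data): state (sums, start), explicit index i.
def sumChunksLoopB (data : List String) : List String → Nat → List Int → Nat → List Int
  | [], _, sums, _ => sums
  | tok :: rest, i, sums, start =>
    if pvIsint tok then sumChunksLoopB data rest (i + 1) sums start
    else sumChunksLoopB data rest (i + 1)
      (sums ++ [pvChunkSum (PySem.List.slice data (some (start : Int)) (some (i : Int)))]) (i + 1)

def sum_chunks_alt (data : List String) : List Int := sumChunksLoopB data data 0 [] 0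

-- ===== PRECONDITION & SPEC =====
def Spec_sum_chunks (data : List String) (out : List Int) : Prop := out = sum_chunks_alt data
instance (data : List String) (out : List Int) : Decidable (Spec_sum_chunks data out) := by unfold Spec_sum_chunks; infer_instance

-- ===== CLAIM (what is proved, stated in full; the proofs are below) =====
def Claim_equal_sum_chunks : Prop := ∀ (data : List String), Dom_sum_chunks data → Spec_sum_chunks data (sum_chunks data)

-- ===== LEMMAS AND PROOFS =====

theorem pvChunkSum_append_singleton (xs : List String) (tok : String) (n : Int)
    (h : PySem.Int.ofStr? tok = some n) :
    pvChunkSum (xs ++ [tok]) = pvChunkSum xs + n := by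
  simp [pvChunkSum, h]

-- the loop invariant: B's state (i, start) carries exactly A's accumulator pvChunkSum data[start:i]
theorem sumChunksLoopB_eq_loopA (data : List String) :
    ∀ (rest : List String) (i start : Nat) (sums : List Int),
      data.drop i = rest → start ≤ i →
      sumChunksLoopB data rest i sums start
        = sumChunksLoopA rest sums (pvChunkSum ((data.drop start).take (i - start))) := by
  intro rest
  induction rest with
  | nil => intro i start sums _ _; simp [sumChunksLoopB, sumChunksLoopA]
  | cons tok rest ih =>
    intro i start sums hdrop hle
    have hget : data[i]? = some tok := by
      have : (data.drop i)[0]? = some tok := by rw [hdrop]; rfl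
      simpa using this
    cases hp : PySem.Int.ofStr? tok with
    | some n =>
      have hbig : sumChunksLoopB data (tok :: rest) i sums start
          = sumChunksLoopB data rest (i + 1) sums start := by
        simp [sumChunksLoopB, pvIsint, hp]
      rw [hbig, ih (i + 1) start sums (by
          have := congrArg List.tail hdrop
          simpa [List.tail_drop] using this) (Nat.le_succ_of_le hle)]
      have htake : (data.drop start).take (i + 1 - start)
          = (data.drop start).take (i - start) ++ [tok] := by
        have h2 : (data.drop start)[i - start]? = some tok := by
          rw [List.getElem?_drop]; rwa [Nat.add_sub_cancel' hle]
        rw [show i + 1 - start = (i - start) + 1 by omega, List.take_add_one, h2]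
        rfl
      rw [htake, pvChunkSum_append_singleton _ _ _ hp]
      simp [sumChunksLoopA, hp]
    | none =>
      have hbig : sumChunksLoopB data (tok :: rest) i sums start
          = sumChunksLoopB data rest (i + 1)
              (sums ++ [pvChunkSum (PySem.List.slice data (some (start : Int)) (some (i : Int)))]) (i + 1) := by
        simp [sumChunksLoopB, pvIsint, hp]
      rw [hbig, ih (i + 1) (i + 1) _ (by
          have := congrArg List.tail hdrop
          simpa [List.tail_drop] using this) (le_refl _)]
      rw [PySem.List.slice_natCast]
      simp [sumChunksLoopA, hp, pvChunkSum]

-- ===== VERDICT (by name: the statement is the Claim_ definition above) =====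
theorem sum_chunks_spec : Claim_equal_sum_chunks := by
  intro data _
  unfold Spec_sum_chunks sum_chunks sum_chunks_alt
  rw [sumChunksLoopB_eq_loopA data data 0 0 [] rfl (le_refl 0)]
  simp [pvChunkSum]
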